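-- pv_equiv track=rewrite | github.com/CMMRLab/LUNAR | src/bond_react_merge/auto_gen_map_file.py | diff_lst
-- ===== SOURCE A (Python) =====
-- def diff_lst(pre_lst, post_lst):
--     count = 0; pre_lst = sorted(pre_lst); post_lst = sorted(post_lst)
--     for n, pre in enumerate(pre_lst):
--         try:
--             post = post_lst[n]
--             if pre != post:
--                 count += 1
--         except: count += 1
--     return int(count)
-- ===== SOURCE B (Python) =====
-- def diff_lst(pre_lst, post_lst):
--     # Counting view: in each sorted list, the occurrences of a value v occupy the
--     # index interval [#smaller, #smaller+count(v)); positions that match are the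
--     # overlaps of those intervals, so answer = len(pre_lst) - total overlap.
--     pre_cnt = {}
--     for x in pre_lst:
--         pre_cnt[x] = pre_cnt.get(x, 0) + 1
--     post_cnt = {}
--     for x in post_lst:
--         post_cnt[x] = post_cnt.get(x, 0) + 1
--     values = sorted(set(pre_lst + post_lst))
--     matches = 0
--     a = b = 0
--     for v in values:
--         c = pre_cnt.get(v, 0)
--         d = post_cnt.get(v, 0)
--         matches += max(0, min(a + c, b + d) - max(a, b))
--         a += c
--         b += d
--     return len(pre_lst) - matches
-- ===== Notes on version B (the rewrite author's own statement) =====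
-- stated objective: alternative
-- what changed: Instead of sorting both lists and comparing them position by position with try/except indexing, B never aligns the sorted lists: it builds count dictionaries, iterates over the sorted distinct values locating each value's contiguous index interval in each sorted list via running prefix counts, sums the interval overlaps as matched positions, and returns len(pre_lst) minus that sum.
import Mathlib
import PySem

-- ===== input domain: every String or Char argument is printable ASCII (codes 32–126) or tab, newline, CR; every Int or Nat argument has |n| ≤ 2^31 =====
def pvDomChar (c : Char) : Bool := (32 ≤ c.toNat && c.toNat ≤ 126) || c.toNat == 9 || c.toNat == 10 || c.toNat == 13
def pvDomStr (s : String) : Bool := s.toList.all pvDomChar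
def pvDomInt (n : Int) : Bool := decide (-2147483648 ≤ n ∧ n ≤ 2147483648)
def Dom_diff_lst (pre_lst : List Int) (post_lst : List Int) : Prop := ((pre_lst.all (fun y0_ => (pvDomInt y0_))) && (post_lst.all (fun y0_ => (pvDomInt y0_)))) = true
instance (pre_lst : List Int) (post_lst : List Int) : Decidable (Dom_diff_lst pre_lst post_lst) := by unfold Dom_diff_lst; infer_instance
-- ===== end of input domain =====

-- B replaces A's positional comparison of the two sorted lists by a counting view:
-- it walks the sorted distinct values, each value occupying a contiguous index
-- interval in each sorted list, sums the interval overlaps (the matching positions)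
-- and returns len(pre_lst) minus that sum; same value, different algorithm.

-- ===== PORT A =====
-- the 'for n, pre in enumerate(pre_lst)' loop: index n, accumulator count;
-- post_lst[n] → pyGet?, IndexError (none) → the except branch's count += 1
def diffLstLoop (post_s : List Int) : List Int → Nat → Int → Int
  | [], _, count => count
  | pre :: rest, n, count =>
    match PySem.List.pyGet? post_s (n : Int) with
    | some post => diffLstLoop post_s rest (n + 1) (if pre ≠ post then count + 1 else count)
    | none => diffLstLoop post_s rest (n + 1) (count + 1)

def diff_lst (pre_lst : List Int) (post_lst : List Int) : Int :=
  let pre_s := PySem.List.sorted pre_lst (fun x => x) false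
  let post_s := PySem.List.sorted post_lst (fun x => x) false
  diffLstLoop post_s pre_s 0 0

-- ===== PORT B =====
-- the body of Source B's 'for v in values' loop: state (matches, a, b)
def bStep (pre_cnt post_cnt : PySem.Dict Int Int) (s : Int × Int × Int) (v : Int) : Int × Int × Int :=
  let c : Int := pre_cnt.getD v 0
  let d : Int := post_cnt.getD v 0
  (s.1 + max 0 (min (s.2.1 + c) (s.2.2 + d) - max s.2.1 s.2.2), s.2.1 + c, s.2.2 + d)

def diff_lst_alt (pre_lst : List Int) (post_lst : List Int) : Int :=
  let pre_cnt := pre_lst.foldl (fun d x => d.insert x (d.getD x 0 + 1)) PySem.Dict.empty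
  let post_cnt := post_lst.foldl (fun d x => d.insert x (d.getD x 0 + 1)) PySem.Dict.empty
  let values := PySem.List.sorted (PySem.Set.ofList (pre_lst ++ post_lst)) (fun x => x) false
  let r := values.foldl (bStep pre_cnt post_cnt) (0, 0, 0)
  (pre_lst.length : Int) - r.1

-- ===== PRECONDITION & SPEC =====
def Spec_diff_lst (pre_lst : List Int) (post_lst : List Int) (out : Int) : Prop := out = diff_lst_alt pre_lst post_lst
instance (pre_lst : List Int) (post_lst : List Int) (out : Int) : Decidable (Spec_diff_lst pre_lst post_lst out) := by unfold Spec_diff_lst; infer_instance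

-- ===== CLAIM (what is proved, stated in full; the proofs are below) =====
def Claim_equal_diff_lst : Prop := ∀ (pre_lst : List Int) (post_lst : List Int), Dom_diff_lst pre_lst post_lst → Spec_diff_lst pre_lst post_lst (diff_lst pre_lst post_lst)

-- ===== LEMMAS AND PROOFS =====

-- count of elements < v, as an Int
def clI (l : List Int) (v : Int) : Int := (l.countP (fun x => decide (x < v)) : Int)

-- the overlap of v's index intervals in the two sorted lists (B's loop increment)
def interI (pre_lst post_lst : List Int) (v : Int) : Int :=
  max 0 (min (clI pre_lst v + (pre_lst.count v : Int)) (clI post_lst v + (post_lst.count v : Int))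
         - max (clI pre_lst v) (clI post_lst v))

-- the loop body of B re-expressed on the original lists (counts instead of dict lookups)
def bStepL (pre_lst post_lst : List Int) (s : Int × Int × Int) (v : Int) : Int × Int × Int :=
  let c : Int := (pre_lst.count v : Int)
  let d : Int := (post_lst.count v : Int)
  (s.1 + max 0 (min (s.2.1 + c) (s.2.2 + d) - max s.2.1 s.2.2), s.2.1 + c, s.2.2 + d)

-- A's loop from index n: count + mismatches on the remaining zip + overhang
theorem diffLstLoop_eq (ys : List Int) (xs : List Int) (n : Nat) (c : Int) :
    diffLstLoop ys xs n c
      = c + ((xs.zip (ys.drop n)).countP (fun p => p.1 ≠ p.2) : Int)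
          + max 0 ((xs.length : Int) - ((ys.length - n : Nat) : Int)) := by
  induction xs generalizing n c with
  | nil => simp [diffLstLoop]
  | cons x xs ih =>
    by_cases h : n < ys.length
    · have hget : PySem.List.pyGet? ys (n : Int) = some ys[n] := by
        rw [PySem.List.pyGet?_natCast, List.getElem?_eq_getElem h]
      have hdrop : ys.drop n = ys[n] :: ys.drop (n + 1) :=
        (List.getElem_cons_drop h).symm
      simp only [diffLstLoop, hget]
      rw [ih, hdrop]
      simp only [List.zip_cons_cons, List.countP_cons, List.length_cons]
      by_cases hxy : x = ys[n] <;> simp [hxy] <;> omega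
    · have hle : ys.length ≤ n := by omega
      have hget : PySem.List.pyGet? ys (n : Int) = none := by
        rw [PySem.List.pyGet?_natCast, List.getElem?_eq_none hle]
      have hd1 : ys.drop n = [] := List.drop_eq_nil_of_le hle
      have hd2 : ys.drop (n + 1) = [] := List.drop_eq_nil_of_le (by omega)
      simp only [diffLstLoop, hget]
      rw [ih, hd2]
      simp only [hd1, List.zip_nil_right, List.countP_nil, List.length_cons]
      push_cast
      omega

-- countP (· ≤ v) = countP (· < v) + count v
theorem countP_le_split (l : List Int) (v : Int) :
    l.countP (fun x => decide (x ≤ v)) = l.countP (fun x => decide (x < v)) + l.count v := by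
  induction l with
  | nil => simp
  | cons x t ih =>
    by_cases h2 : x = v
    · subst h2
      simp [List.countP_cons, List.count_cons, ih]
      omega
    · by_cases h1 : x < v
      · simp [List.countP_cons, List.count_cons, ih, h1, h1.le, h2]
        omega
      · have hxv : ¬ x ≤ v := fun hle => h1 (lt_of_le_of_ne hle h2)
        simp [List.countP_cons, List.count_cons, ih, h1, h2, hxv]

-- in a sorted list, the elements < v are exactly the first countP (· < v) positions
theorem sorted_lt_iff (P : List Int) (hs : P.Pairwise (· ≤ ·)) (v : Int) :
    ∀ i (h : i < P.length), (P[i] < v ↔ i < P.countP (fun x => decide (x < v))) := by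
  induction P with
  | nil => intro i h; simp at h
  | cons p t ih =>
    intro i h
    have hpt : ∀ x ∈ t, p ≤ x := (List.pairwise_cons.mp hs).1
    by_cases hp : p < v
    · have hc : (p :: t).countP (fun x => decide (x < v))
          = t.countP (fun x => decide (x < v)) + 1 := by
        simp [List.countP_cons, hp]
      cases i with
      | zero =>
        rw [List.getElem_cons_zero, hc]
        exact iff_of_true hp (by omega)
      | succ j =>
        have hj : j < t.length := by simpa using h
        have H := ih (List.pairwise_cons.mp hs).2 j hj
        rw [List.getElem_cons_succ, hc, H]
        omega
    · have ht0 : t.countP (fun x => decide (x < v)) = 0 := by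
        rw [List.countP_eq_zero]
        intro x hx
        have := hpt x hx
        simp; omega
      have hcnt : (p :: t).countP (fun x => decide (x < v)) = 0 := by
        simp [List.countP_cons, hp, ht0]
      rw [hcnt]
      refine iff_of_false ?_ (by omega)
      cases i with
      | zero => simpa using hp
      | succ j =>
        have hj : j < t.length := by simpa using h
        have hge : p ≤ t[j] := hpt _ (List.getElem_mem hj)
        simp only [List.getElem_cons_succ]
        omega
    
-- same with ≤ v
theorem sorted_le_iff (P : List Int) (hs : P.Pairwise (· ≤ ·)) (v : Int) :
    ∀ i (h : i < P.length), (P[i] ≤ v ↔ i < P.countP (fun x => decide (x ≤ v))) := by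
  induction P with
  | nil => intro i h; simp at h
  | cons p t ih =>
    intro i h
    have hpt : ∀ x ∈ t, p ≤ x := (List.pairwise_cons.mp hs).1
    by_cases hp : p ≤ v
    · have hc : (p :: t).countP (fun x => decide (x ≤ v))
          = t.countP (fun x => decide (x ≤ v)) + 1 := by
        simp [List.countP_cons, hp]
      cases i with
      | zero =>
        rw [List.getElem_cons_zero, hc]
        exact iff_of_true hp (by omega)
      | succ j =>
        have hj : j < t.length := by simpa using h
        have H := ih (List.pairwise_cons.mp hs).2 j hj
        rw [List.getElem_cons_succ, hc, H]
        omega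
    · have ht0 : t.countP (fun x => decide (x ≤ v)) = 0 := by
        rw [List.countP_eq_zero]
        intro x hx
        have := hpt x hx
        simp; omega
      have hcnt : (p :: t).countP (fun x => decide (x ≤ v)) = 0 := by
        simp [List.countP_cons, hp, ht0]
      rw [hcnt]
      refine iff_of_false ?_ (by omega)
      cases i with
      | zero => simpa using hp
      | succ j =>
        have hj : j < t.length := by simpa using h
        have hge : p ≤ t[j] := hpt _ (List.getElem_mem hj)
        simp only [List.getElem_cons_succ]
        omega

-- in a sorted list, P[i] = v ⟷ i lies in v's index interval
theorem sorted_eq_iff (P : List Int) (hs : P.Pairwise (· ≤ ·)) (v : Int)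
    (i : Nat) (h : i < P.length) :
    P[i] = v ↔ (P.countP (fun x => decide (x < v)) ≤ i ∧
                i < P.countP (fun x => decide (x < v)) + P.count v) := by
  have h1 := sorted_lt_iff P hs v i h
  have h2 := sorted_le_iff P hs v i h
  rw [countP_le_split] at h2
  constructor
  · intro he
    have h2' := h2.mp (le_of_eq he)
    have h1' : ¬ i < P.countP (fun x => decide (x < v)) := by
      intro hc
      have := h1.mpr hc
      omega
    exact ⟨by omega, h2'⟩
  · rintro ⟨ha, hb⟩
    have hle := h2.mpr hb
    have hnlt : ¬ P[i] < v := by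
      intro hl
      have := h1.mp hl
      omega
    omega

-- the fold in B: with correct prefix counts in the state, it adds the overlaps
theorem foldB_eq (pre_lst post_lst : List Int) :
    ∀ (vs : List Int) (m a b : Int),
      vs.Pairwise (· < ·) →
      (∀ v, vs.head? = some v →
        a = clI pre_lst v ∧ b = clI post_lst v ∧
        (∀ x ∈ pre_lst, x < v ∨ x ∈ vs) ∧ (∀ x ∈ post_lst, x < v ∨ x ∈ vs)) →
      (vs.foldl (bStepL pre_lst post_lst) (m, a, b)).1
        = m + (vs.map (interI pre_lst post_lst)).sum := by
  intro vs
  induction vs with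
  | nil => intro m a b _ _; simp
  | cons v rest ih =>
    intro m a b hpw hhd
    obtain ⟨ha, hb, hmpre, hmpost⟩ := hhd v rfl
    have hpw' : rest.Pairwise (· < ·) := (List.pairwise_cons.mp hpw).2
    have hvrest : ∀ y ∈ rest, v < y := (List.pairwise_cons.mp hpw).1
    have hstep : bStepL pre_lst post_lst (m, a, b) v
        = (m + interI pre_lst post_lst v,
           a + (pre_lst.count v : Int), b + (post_lst.count v : Int)) := by
      simp [bStepL, interI, ha, hb]
    have hnext : ∀ (l : List Int), (∀ x ∈ l, x < v ∨ x ∈ v :: rest) →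
        ∀ v', rest.head? = some v' →
        (l.countP (fun x => decide (x < v)) : Int) + (l.count v : Int) = clI l v' := by
      intro l hmem v' hv'
      obtain ⟨rest', hrest⟩ : ∃ rest', rest = v' :: rest' := by
        cases rest with
        | nil => simp at hv'
        | cons h t => exact ⟨t, by simpa using hv'⟩
      have hvv' : v < v' := hvrest v' (by simp [hrest])
      have hcong : l.countP (fun x => decide (x ≤ v)) = l.countP (fun x => decide (x < v')) := by
        apply List.countP_congr
        intro x hx
        simp only [decide_eq_true_eq, decide_eq_decide, eq_iff_iff]
        constructor
        · intro hxv; omega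
        · intro hxv'
          rcases hmem x hx with hlt | hin
          · omega
          · rcases List.mem_cons.mp hin with rfl | hin
            · omega
            · have := hvrest x (by simpa [hrest] using hin) |>.le
              rcases (by simpa [hrest] using hin : x = v' ∨ x ∈ rest') with rfl | hin'
              · omega
              · have : v' < x := (List.pairwise_cons.mp (hrest ▸ hpw')).1 x hin'
                omega
      have := countP_le_split l v
      unfold clI
      rw [← hcong]
      omega
    rw [List.foldl_cons, hstep, ih _ _ _ hpw' ?_]
    · simp [List.map_cons, List.sum_cons]; ring
    · intro v' hv'
      refine ⟨?_, ?_, ?_, ?_⟩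
      · rw [ha]; simpa [clI] using hnext pre_lst hmpre v' hv'
      · rw [hb]; simpa [clI] using hnext post_lst hmpost v' hv' 
      · intro x hx
        rcases hmpre x hx with hlt | hin
        · left
          obtain ⟨rest', hrest⟩ : ∃ rest', rest = v' :: rest' := by
            cases rest with
            | nil => simp at hv'
            | cons h t => exact ⟨t, by simpa using hv'⟩
          have := hvrest v' (by simp [hrest]); omega
        · rcases List.mem_cons.mp hin with rfl | hin
          · left
            obtain ⟨rest', hrest⟩ : ∃ rest', rest = v' :: rest' := by
              cases rest with
              | nil => simp at hv'
              | cons h t => exact ⟨t, by simpa using hv'⟩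
            exact hvrest v' (by simp [hrest])
          · right; exact hin
      · intro x hx
        rcases hmpost x hx with hlt | hin
        · left
          obtain ⟨rest', hrest⟩ : ∃ rest', rest = v' :: rest' := by
            cases rest with
            | nil => simp at hv'
            | cons h t => exact ⟨t, by simpa using hv'⟩
          have := hvrest v' (by simp [hrest]); omega
        · rcases List.mem_cons.mp hin with rfl | hin
          · left
            obtain ⟨rest', hrest⟩ : ∃ rest', rest = v' :: rest' := by
              cases rest with
              | nil => simp at hv'
              | cons h t => exact ⟨t, by simpa using hv'⟩
            exact hvrest v' (by simp [hrest])
          · right; exact hin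

-- countP p + countP (not p) = length (pointwise complement)
theorem countP_not_split {α : Type} (l : List α) (p : α → Bool) :
    l.countP p + l.countP (fun x => !p x) = l.length := by
  induction l with
  | nil => simp
  | cons x t ih =>
    simp only [List.countP_cons, List.length_cons]
    cases h : p x <;> simp [h] <;> omega

-- the matching positions of the zip, as an indexed sum
theorem zip_countP_eq_sum (P Q : List Int) :
    (P.zip Q).countP (fun p => p.1 == p.2)
      = ∑ i ∈ Finset.range (min P.length Q.length),
          (if P.getD i 0 = Q.getD i 0 then 1 else 0) := by
  induction P generalizing Q with
  | nil => simp
  | cons x P' ih =>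
    cases Q with
    | nil => simp
    | cons y Q' =>
      have hm : min (x :: P').length ((y :: Q')).length = min P'.length Q'.length + 1 := by
        simp [List.length_cons, Nat.succ_min_succ]
      rw [hm, Finset.sum_range_succ']
      simp only [List.zip_cons_cons, List.countP_cons, List.getD_cons_succ, List.getD_cons_zero]
      rw [ih]
      by_cases h : x = y <;> simp [h]

-- sum of interval overlaps = number of matching positions of the sorted lists
theorem sum_interI_eq_match (pre_lst post_lst vs : List Int)
    (hnd : vs.Nodup)
    (hpre : ∀ x ∈ pre_lst, x ∈ vs) :
    (vs.map (interI pre_lst post_lst)).sum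
      = ((((PySem.List.sorted pre_lst (fun x => x) false).zip
           (PySem.List.sorted post_lst (fun x => x) false)).countP
             (fun p => p.1 == p.2) : Nat) : Int) := by
  set P := PySem.List.sorted pre_lst (fun x => x) false with hPdef
  set Q := PySem.List.sorted post_lst (fun x => x) false with hQdef
  have hPs : P.Pairwise (· ≤ ·) := PySem.List.sorted_pairwise pre_lst (fun x => x)
  have hQs : Q.Pairwise (· ≤ ·) := PySem.List.sorted_pairwise post_lst (fun x => x)
  have hPperm : P.Perm pre_lst := PySem.List.sorted_perm pre_lst (fun x => x) false
  have hQperm : Q.Perm post_lst := PySem.List.sorted_perm post_lst (fun x => x) false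
  -- Nat-valued interval endpoints, phrased on the original lists
  set Ap : Int → Nat := fun v => pre_lst.countP (fun x => decide (x < v)) with hAp
  set Bq : Int → Nat := fun v => post_lst.countP (fun x => decide (x < v)) with hBq
  set cp : Int → Nat := fun v => pre_lst.count v with hcp
  set dq : Int → Nat := fun v => post_lst.count v with hdq
  set m := min P.length Q.length with hm
  have hApP : ∀ v, P.countP (fun x => decide (x < v)) = Ap v := fun v => hPperm.countP_eq _
  have hBqQ : ∀ v, Q.countP (fun x => decide (x < v)) = Bq v := fun v => hQperm.countP_eq _
  have hcpP : ∀ v, P.count v = cp v := fun v => hPperm.count v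
  have hdqQ : ∀ v, Q.count v = dq v := fun v => hQperm.count v
  have hlp : P.length = pre_lst.length := hPperm.length_eq
  have hlq : Q.length = post_lst.length := hQperm.length_eq
  have hApc : ∀ v, Ap v + cp v ≤ P.length := by
    intro v
    rw [hlp, ← countP_le_split pre_lst v]
    exact List.countP_le_length
  have hBqd : ∀ v, Bq v + dq v ≤ Q.length := by
    intro v
    rw [hlq, ← countP_le_split post_lst v]
    exact List.countP_le_length
  -- the characterization on P and Q, in terms of Ap/cp/Bq/dq
  have hPchar : ∀ (i : Nat) (h : i < P.length) (v : Int),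
      P[i] = v ↔ (Ap v ≤ i ∧ i < Ap v + cp v) := by
    intro i h v
    have := sorted_eq_iff P hPs v i h
    rwa [hApP, hcpP] at this
  have hQchar : ∀ (i : Nat) (h : i < Q.length) (v : Int),
      Q[i] = v ↔ (Bq v ≤ i ∧ i < Bq v + dq v) := by
    intro i h v
    have := sorted_eq_iff Q hQs v i h
    rwa [hBqQ, hdqQ] at this
  -- Nat-level identity: match count = sum of interval overlaps
  have hnat : (P.zip Q).countP (fun p => p.1 == p.2)
      = ∑ v ∈ vs.toFinset, (min (Ap v + cp v) (Bq v + dq v) - max (Ap v) (Bq v)) := by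
    rw [zip_countP_eq_sum]
    have hpoint : ∀ i ∈ Finset.range m,
        (if P.getD i 0 = Q.getD i 0 then (1 : Nat) else 0)
          = ∑ v ∈ vs.toFinset, (if P.getD i 0 = v ∧ Q.getD i 0 = v then 1 else 0) := by
      intro i hi
      have him : i < m := Finset.mem_range.mp hi
      by_cases heq : P.getD i 0 = Q.getD i 0
      · have hiP : i < P.length := lt_of_lt_of_le him (min_le_left _ _)
        have hmem : P.getD i 0 ∈ vs.toFinset := by
          have h1 : P.getD i 0 ∈ P := by
            rw [List.getD_eq_getElem P 0 hiP]
            exact List.getElem_mem hiP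
          exact List.mem_toFinset.mpr (hpre _ (hPperm.mem_iff.mp h1))
        rw [if_pos heq]
        have hconv : (∑ v ∈ vs.toFinset, (if P.getD i 0 = v ∧ Q.getD i 0 = v then (1 : Nat) else 0))
            = ∑ v ∈ vs.toFinset, (if P.getD i 0 = v then 1 else 0) := by
          refine Finset.sum_congr rfl ?_
          intro v _
          by_cases hv : P.getD i 0 = v
          · rw [if_pos ⟨hv, heq ▸ hv⟩, if_pos hv]
          · rw [if_neg (fun hc => hv hc.1), if_neg hv]
        rw [hconv, Finset.sum_ite_eq vs.toFinset _ (fun _ => (1 : Nat)), if_pos hmem]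
      · rw [if_neg heq]
        symm
        apply Finset.sum_eq_zero
        intro v _
        exact if_neg (fun hc => heq (hc.1.trans hc.2.symm))
    rw [Finset.sum_congr rfl hpoint, Finset.sum_comm]
    refine Finset.sum_congr rfl ?_
    intro v _
    rw [show (∑ i ∈ Finset.range m, if P.getD i 0 = v ∧ Q.getD i 0 = v then (1 : Nat) else 0)
        = ((Finset.range m).filter (fun i => P.getD i 0 = v ∧ Q.getD i 0 = v)).card from
      (Finset.card_filter _ _).symm]
    have hset : (Finset.range m).filter (fun i => P.getD i 0 = v ∧ Q.getD i 0 = v)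
        = Finset.Ico (max (Ap v) (Bq v)) (min (Ap v + cp v) (Bq v + dq v)) := by
      ext i
      simp only [Finset.mem_filter, Finset.mem_range, Finset.mem_Ico]
      constructor
      · rintro ⟨him, h1, h2⟩
        have hiP : i < P.length := lt_of_lt_of_le him (min_le_left _ _)
        have hiQ : i < Q.length := lt_of_lt_of_le him (min_le_right _ _)
        rw [List.getD_eq_getElem P 0 hiP] at h1
        rw [List.getD_eq_getElem Q 0 hiQ] at h2
        have hA := (hPchar i hiP v).mp h1
        have hB := (hQchar i hiQ v).mp h2
        omega
      · rintro ⟨hlo, hhi⟩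
        have hiP : i < P.length := by have := hApc v; omega
        have hiQ : i < Q.length := by have := hBqd v; omega
        have him : i < m := by omega
        have h1 := (hPchar i hiP v).mpr (by omega)
        have h2 := (hQchar i hiQ v).mpr (by omega)
        rw [List.getD_eq_getElem P 0 hiP, List.getD_eq_getElem Q 0 hiQ]
        exact ⟨him, h1, h2⟩
    rw [hset, Nat.card_Ico]
  -- transfer to the Int-valued sum of interI
  have hcast : ∀ v ∈ vs.toFinset, interI pre_lst post_lst v
      = ((min (Ap v + cp v) (Bq v + dq v) - max (Ap v) (Bq v) : Nat) : Int) := by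
    intro v _
    unfold interI clI
    rw [hAp, hBq, hcp, hdq]
    simp only [min_def, max_def]
    split_ifs <;> push_cast <;> omega
  rw [← List.sum_toFinset _ hnd, Finset.sum_congr rfl hcast, ← Nat.cast_sum, hnat]
-- ===== VERDICT (by name: the statement is the Claim_ definition above) =====
theorem diff_lst_spec : Claim_equal_diff_lst := by
  intro pre_lst post_lst _
  unfold Spec_diff_lst diff_lst diff_lst_alt
  set P := PySem.List.sorted pre_lst (fun x => x) false with hPdef
  set Q := PySem.List.sorted post_lst (fun x => x) false with hQdef
  set values := PySem.List.sorted (PySem.Set.ofList (pre_lst ++ post_lst)) (fun x => x) false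
    with hVdef
  show diffLstLoop Q P 0 0
      = (pre_lst.length : Int)
        - (List.foldl (bStep
            (pre_lst.foldl (fun d x => d.insert x (d.getD x 0 + 1)) PySem.Dict.empty)
            (post_lst.foldl (fun d x => d.insert x (d.getD x 0 + 1)) PySem.Dict.empty))
            (0, 0, 0) values).1
  have hfun : bStep
      (pre_lst.foldl (fun d x => d.insert x (d.getD x 0 + 1)) PySem.Dict.empty)
      (post_lst.foldl (fun d x => d.insert x (d.getD x 0 + 1)) PySem.Dict.empty)
      = bStepL pre_lst post_lst := by
    funext s v
    simp [bStep, bStepL, PySem.Dict.getD_foldl_insert_add_one]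
  rw [hfun]
  -- B-side facts
  have hnodup : values.Nodup :=
    ((PySem.List.sorted_perm _ _ _).nodup_iff).mpr (PySem.Set.nodup_ofList _)
  have hprem : ∀ x ∈ pre_lst, x ∈ values := by
    intro x hx
    rw [hVdef, PySem.List.mem_sorted]
    exact (PySem.Set.mem_ofList _ _).mpr (List.mem_append_left _ hx)
  have hpostm : ∀ x ∈ post_lst, x ∈ values := by
    intro x hx
    rw [hVdef, PySem.List.mem_sorted]
    exact (PySem.Set.mem_ofList _ _).mpr (List.mem_append_right _ hx)
  have hhead : ∀ v, values.head? = some v →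
      (0 : Int) = clI pre_lst v ∧ (0 : Int) = clI post_lst v ∧
      (∀ x ∈ pre_lst, x < v ∨ x ∈ values) ∧ (∀ x ∈ post_lst, x < v ∨ x ∈ values) := by
    intro v hv
    obtain ⟨t, ht⟩ : ∃ t, values = v :: t := by
      cases hvv : values with
      | nil => rw [hvv] at hv; simp at hv
      | cons a t =>
        rw [hvv] at hv
        simp only [List.head?_cons, Option.some.injEq] at hv
        exact ⟨t, by rw [hv]⟩
    have hmin : ∀ y ∈ PySem.Set.ofList (pre_lst ++ post_lst), v ≤ y :=
      PySem.List.key_head_sorted_le _ _ (hVdef.symm.trans ht)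
    have hz : ∀ (l : List Int), (∀ x ∈ l, x ∈ values) → clI l v = 0 := by
      intro l hl
      unfold clI
      have : l.countP (fun x => decide (x < v)) = 0 := by
        rw [List.countP_eq_zero]
        intro x hx
        have hxv : v ≤ x := by
          have := hl x hx
          rw [hVdef, PySem.List.mem_sorted] at this
          exact hmin x this
        simp
        omega
      rw [this]
      simp
    exact ⟨(hz pre_lst hprem).symm, (hz post_lst hpostm).symm,
      fun x hx => Or.inr (hprem x hx), fun x hx => Or.inr (hpostm x hx)⟩
  have hfold := foldB_eq pre_lst post_lst values 0 0 0
    (hVdef ▸ PySem.List.sorted_ofList_pairwise_lt (pre_lst ++ post_lst)) hhead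
  have hsum := sum_interI_eq_match pre_lst post_lst values hnodup hprem
  rw [← hPdef, ← hQdef] at hsum
  -- A-side facts
  have hAeq := diffLstLoop_eq Q P 0 0
  rw [List.drop_zero] at hAeq
  have hneg : (P.zip Q).countP (fun p => decide (p.1 ≠ p.2))
      = (P.zip Q).countP (fun p => !(p.1 == p.2)) := by
    apply List.countP_congr
    intro p _
    by_cases h : p.1 = p.2 <;> simp [h]
  have hcompl := countP_not_split (P.zip Q) (fun p => p.1 == p.2)
  have hziplen : (P.zip Q).length = min P.length Q.length := List.length_zip
  have hmatble : (P.zip Q).countP (fun p => p.1 == p.2) ≤ (P.zip Q).length :=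
    List.countP_le_length
  have hlp : P.length = pre_lst.length := (PySem.List.sorted_perm _ _ _).length_eq
  have hlq : Q.length = post_lst.length := (PySem.List.sorted_perm _ _ _).length_eq
  -- assemble
  rw [hAeq, hfold, hsum]
  rw [hneg] at *
  have h1 : (P.zip Q).countP (fun p => !(p.1 == p.2))
      = min P.length Q.length - (P.zip Q).countP (fun p => p.1 == p.2) := by
    omega
  rw [h1]
  have h2 : (Q.length - 0 : Nat) = Q.length := by omega
  rw [h2, hlp, hlq]
  have h3 : (P.zip Q).countP (fun p => p.1 == p.2) ≤ min pre_lst.length post_lst.length := by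
    omega
  push_cast
  omega
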